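-- pv_equiv track=rewrite | github.com/phucduongBKDN/100exercies | 100 exercise/no48.py | greaterTree
-- ===== SOURCE A (Python) =====
-- def greaterTree(tree):
--     output = []
--     for i in range(len(tree)):
--         sum = tree[i]
--         for j in range(len(tree)):
--             if i == j:
--                 continue
--             else:
--                 if tree[j]>tree[i]:
--                     sum += tree[j]
--         output.append(sum)
--     return output
-- ===== SOURCE B (Python) =====
-- def greaterTree(tree):
--     # O(n log n): count values once, walk distinct values in descending order
--     # accumulating the running sum of strictly greater elements, then map.
--     count = {}
--     for v in tree:
--         count[v] = count.get(v, 0) + 1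
--     greater = {}
--     run = 0
--     for v in sorted(count, reverse=True):
--         greater[v] = run
--         run += v * count[v]
--     return [v + greater[v] for v in tree]
-- ===== Notes on version B (the rewrite author's own statement) =====
-- stated objective: faster
-- what changed: Replaces the nested O(n^2) scan by a counting dict plus one descending-sorted walk over distinct values that accumulates a running sum of strictly greater elements, then a single lookup pass.
import Mathlib
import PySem

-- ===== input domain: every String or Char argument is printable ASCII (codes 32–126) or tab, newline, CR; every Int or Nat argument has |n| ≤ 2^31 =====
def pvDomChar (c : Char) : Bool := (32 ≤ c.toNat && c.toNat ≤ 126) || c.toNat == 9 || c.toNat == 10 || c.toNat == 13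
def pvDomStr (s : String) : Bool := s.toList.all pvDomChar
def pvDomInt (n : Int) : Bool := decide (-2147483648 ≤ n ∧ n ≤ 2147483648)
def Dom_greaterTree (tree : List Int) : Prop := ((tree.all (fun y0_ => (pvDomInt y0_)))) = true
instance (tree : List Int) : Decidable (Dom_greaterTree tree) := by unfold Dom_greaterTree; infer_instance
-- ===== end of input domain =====

-- B replaces A's nested quadratic scan by a value counter + one descending walk over
-- distinct values with a running sum (objective: faster).

-- ===== PORT A =====
def greaterTree (tree : List Int) : List Int :=
  (PySem.List.pyRange 0 (PySem.List.len tree) 1).foldl (fun output i =>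
    let s := (PySem.List.pyRange 0 (PySem.List.len tree) 1).foldl (fun s j =>
      if i == j then s
      else if PySem.List.pyGetD tree i 0 < PySem.List.pyGetD tree j 0 then
        s + PySem.List.pyGetD tree j 0
      else s) (PySem.List.pyGetD tree i 0)  -- indices from range(len(tree)) are in range, so pyGetD is exact
    output ++ [s]) []

-- ===== PORT B =====
def greaterTree_alt (tree : List Int) : List Int :=
  let count := tree.foldl (fun d v => d.insert v (d.getD v 0 + 1)) PySem.Dict.empty
  let st := (PySem.List.sorted count.keys (fun x => x) true).foldl
    (fun (st : PySem.Dict Int Int × Int) v =>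
      (st.1.insert v st.2, st.2 + v * count.getD v 0)) (PySem.Dict.empty, 0)
  -- greater[v] and count[v]: the key is always present, so getD _ 0 is exact
  tree.map (fun v => v + st.1.getD v 0)

-- ===== PRECONDITION & SPEC =====
def Spec_greaterTree (tree : List Int) (out : List Int) : Prop := out = greaterTree_alt tree
instance (tree : List Int) (out : List Int) : Decidable (Spec_greaterTree tree out) := by unfold Spec_greaterTree; infer_instance

-- ===== CLAIM (what is proved, stated in full; the proofs are below) =====
def Claim_equal_greaterTree : Prop := ∀ (tree : List Int), Dom_greaterTree tree → Spec_greaterTree tree (greaterTree tree)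

-- ===== LEMMAS AND PROOFS =====

/-- The common specification value: the sum of the strictly greater elements. -/
def gsum (tree : List Int) (x : Int) : Int := (tree.filter (fun y => decide (x < y))).sum

theorem foldl_addif (l : List Int) (s x : Int) :
    l.foldl (fun s y => if x < y then s + y else s) s
      = s + (l.filter (fun y => decide (x < y))).sum := by
  induction l generalizing s with
  | nil => simp
  | cons y l ih =>
    by_cases h : x < y
    · simp [ih, h]; ring
    · simp [ih, h]

theorem inner_eq (tree : List Int) (i : Int) :
    (PySem.List.pyRange 0 (PySem.List.len tree) 1).foldl (fun s j =>
        if i == j then s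
        else if PySem.List.pyGetD tree i 0 < PySem.List.pyGetD tree j 0 then
          s + PySem.List.pyGetD tree j 0
        else s) (PySem.List.pyGetD tree i 0)
      = PySem.List.pyGetD tree i 0 + gsum tree (PySem.List.pyGetD tree i 0) := by
  have hf : (fun (s j : Int) =>
        if i == j then s
        else if PySem.List.pyGetD tree i 0 < PySem.List.pyGetD tree j 0 then
          s + PySem.List.pyGetD tree j 0
        else s)
      = fun (s j : Int) =>
          (fun (s' y : Int) => if PySem.List.pyGetD tree i 0 < y then s' + y else s')
            s (PySem.List.pyGetD tree j 0) := by
    funext s j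
    by_cases h : i = j
    · subst h; simp
    · simp [h]
  rw [hf, PySem.List.foldl_pyRange_zero_pyGetD tree 0
    (fun (s' y : Int) => if PySem.List.pyGetD tree i 0 < y then s' + y else s')
    (PySem.List.pyGetD tree i 0), foldl_addif]
  rfl

theorem greaterTree_eq_map (tree : List Int) :
    greaterTree tree = tree.map (fun x => x + gsum tree x) := by
  simp only [greaterTree]
  have hstep : (fun (output : List Int) (i : Int) => output ++
      [(PySem.List.pyRange 0 (PySem.List.len tree) 1).foldl (fun s j =>
        if i == j then s
        else if PySem.List.pyGetD tree i 0 < PySem.List.pyGetD tree j 0 then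
          s + PySem.List.pyGetD tree j 0
        else s) (PySem.List.pyGetD tree i 0)])
      = fun (output : List Int) (i : Int) => output ++
          [(fun x => x + gsum tree x) (PySem.List.pyGetD tree i 0)] := by
    funext output i
    rw [inner_eq]
  rw [hstep, PySem.List.foldl_append_singleton_eq_map]
  rw [List.nil_append,
    show (fun i => (fun x => x + gsum tree x) (PySem.List.pyGetD tree i 0))
        = (fun x => x + gsum tree x) ∘ (fun j => PySem.List.pyGetD tree j 0) from rfl,
    ← List.map_map, PySem.List.map_pyGetD_pyRange_zero]

theorem fold_keep (c : Int → Int) (L : List Int) : ∀ (d : PySem.Dict Int Int) (r v : Int),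
    v ∉ L →
    ((L.foldl (fun st w => (st.1.insert w st.2, st.2 + w * c w)) (d, r)).1).getD v 0
      = d.getD v 0 := by
  induction L with
  | nil => intro d r v _; rfl
  | cons w L ih =>
    intro d r v hv
    rw [List.foldl_cons, ih _ _ _ (fun h => hv (List.mem_cons_of_mem _ h))]
    rw [PySem.Dict.getD_insert]
    have : v ≠ w := fun h => hv (h ▸ List.mem_cons_self)
    simp [this]

theorem fold_greater (c : Int → Int) (L : List Int) : ∀ (d : PySem.Dict Int Int) (r v : Int),
    v ∈ L → L.Pairwise (fun a b => b < a) →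
    ((L.foldl (fun st w => (st.1.insert w st.2, st.2 + w * c w)) (d, r)).1).getD v 0
      = r + ((L.filter (fun w => decide (v < w))).map (fun w => w * c w)).sum := by
  induction L with
  | nil => intro d r v hv _; exact absurd hv (List.not_mem_nil)
  | cons w L ih =>
    intro d r v hv hp
    obtain ⟨hw, hp'⟩ := List.pairwise_cons.mp hp
    rw [List.foldl_cons]
    rcases List.mem_cons.mp hv with h | h
    · subst h
      have hnot : v ∉ L := fun hm => lt_irrefl v (hw v hm)
      rw [fold_keep c L _ _ _ hnot, PySem.Dict.getD_insert]
      have hfil : L.filter (fun w => decide (v < w)) = [] := by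
        rw [List.filter_eq_nil_iff]
        intro a ha
        have := hw a ha
        simp; omega
      simp [hfil]
    · have hvw : v < w := hw v h
      rw [ih _ _ _ h hp']
      have hfil : List.filter (fun w' => decide (v < w')) (w :: L)
          = w :: L.filter (fun w' => decide (v < w')) := by
        simp [hvw]
      rw [hfil, List.map_cons, List.sum_cons]
      ring

theorem sum_filter_beq (t : List Int) (w : Int) :
    (t.filter (fun y => y == w)).sum = w * (t.count w : Int) := by
  induction t with
  | nil => simp
  | cons a t ih =>
    by_cases h : a = w
    · subst h
      simp [ih]
      ring
    · simp [h, ih]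

theorem sum_filter_or (t : List Int) (p q : Int → Bool)
    (h : ∀ y, ¬(p y = true ∧ q y = true)) :
    (t.filter (fun y => p y || q y)).sum = (t.filter p).sum + (t.filter q).sum := by
  induction t with
  | nil => simp
  | cons a t ih =>
    by_cases hp : p a <;> by_cases hq : q a
    · exact absurd ⟨hp, hq⟩ (h a)
    · simp [hp, hq, ih]; ring
    · simp [hp, hq, ih]; ring
    · simp [hp, hq, ih]

theorem sum_mul_count (T : List Int) : ∀ (t : List Int), T.Nodup →
    (T.map (fun w => w * (t.count w : Int))).sum
      = (t.filter (fun y => decide (y ∈ T))).sum := by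
  induction T with
  | nil => simp
  | cons w T ih =>
    intro t hn
    obtain ⟨hw, hn'⟩ := List.nodup_cons.mp hn
    have he : (fun y : Int => decide (y ∈ w :: T)) = fun y => (y == w) || decide (y ∈ T) := by
      funext y
      by_cases h1 : y = w <;> by_cases h2 : y ∈ T <;> simp [h1, h2]
    have hsplit : (t.filter (fun y => decide (y ∈ w :: T))).sum
        = (t.filter (fun y => y == w)).sum + (t.filter (fun y => decide (y ∈ T))).sum := by
      rw [he]
      apply sum_filter_or
      rintro y ⟨h1, h2⟩
      exact hw ((beq_iff_eq.mp h1) ▸ of_decide_eq_true h2)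
    rw [List.map_cons, List.sum_cons, ih t hn', hsplit, sum_filter_beq]

theorem greaterTree_alt_eq_map (tree : List Int) :
    greaterTree_alt tree = tree.map (fun x => x + gsum tree x) := by
  simp only [greaterTree_alt]
  rw [PySem.Dict.foldl_insert_getD_add_one_eq_counter]
  have hfun : (fun (st : PySem.Dict Int Int × Int) (v : Int) =>
        (st.1.insert v st.2, st.2 + v * (PySem.Dict.counter tree).getD v 0))
      = fun (st : PySem.Dict Int Int × Int) (v : Int) =>
          (st.1.insert v st.2, st.2 + v * ((tree.count v : Int))) := by
    funext st v
    rw [PySem.Dict.getD_counter]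
  rw [hfun, PySem.Dict.keys_counter]
  apply List.map_congr_left
  intro v hv
  have hperm := PySem.List.sorted_perm (PySem.Set.ofList tree) (fun x => x) true
  have hnd : (PySem.List.sorted (PySem.Set.ofList tree) (fun x => x) true).Nodup :=
    hperm.symm.nodup (PySem.Set.nodup_ofList tree)
  have hle : (PySem.List.sorted (PySem.Set.ofList tree) (fun x => x) true).Pairwise
      (fun a b => b ≤ a) := PySem.List.sorted_pairwise_rev _ _
  have hlt : (PySem.List.sorted (PySem.Set.ofList tree) (fun x => x) true).Pairwise
      (fun a b => b < a) :=
    (hle.and hnd).imp (fun h => lt_of_le_of_ne h.1 (Ne.symm h.2))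
  have hmem : v ∈ PySem.List.sorted (PySem.Set.ofList tree) (fun x => x) true := by
    rw [PySem.List.mem_sorted]
    exact (PySem.Set.mem_ofList _ _).mpr hv
  rw [fold_greater _ _ _ _ _ hmem hlt, zero_add]
  congr 1
  set L := PySem.List.sorted (PySem.Set.ofList tree) (fun x => x) true with hL
  have hndT : (L.filter (fun w => decide (v < w))).Nodup := hnd.filter _
  rw [sum_mul_count _ tree hndT]
  unfold gsum
  apply congrArg
  apply List.filter_congr
  intro y hy
  by_cases h : v < y
  · simp [h, List.mem_filter, hL, PySem.List.mem_sorted, PySem.Set.mem_ofList, hy]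
  · simp [h, List.mem_filter]

-- ===== VERDICT (by name: the statement is the Claim_ definition above) =====
theorem greaterTree_spec : Claim_equal_greaterTree := by
  intro tree _
  unfold Spec_greaterTree
  rw [greaterTree_eq_map, greaterTree_alt_eq_map]
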